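-- pv_equiv track=rewrite | github.com/horrovac/irssi-colour-conversion | irssicolour.py | cvrt
-- ===== SOURCE A (Python) =====
-- def cvrt(num):
-- 	if ( num < 17 ):
-- 		return ( "{:02X}".format(num) )
-- 	else:
-- 		num -=6
--
-- 	i=0
-- 	for section in range( 10, 257, 36 ):
-- 		if ( num < section ):
-- 			break
-- 		i += 1
--
-- 	tens = i * 10
-- 	num -= (tens+((i-1)*26))
--
-- 	# if the remaining number is less than ten just use that
-- 	# if not, use str() to retrieve an ASCII char A-Z - kinda like hexadecimal
-- 	# but 36-based. Above 7x it's diferent again, here it's 0 == A. Bonkers.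
-- 	if ( i < 7 ):
-- 		if ( num < 10 ):
-- 			ones = str(num)
-- 		else:
-- 			ones = chr((num-10)+65)
-- 	else:
-- 		ones = chr(num+65)
--
-- 	return "{}{:s}".format( int(tens/10), ones )
-- ===== SOURCE B (Python) =====
-- def cvrt(num):
-- 	if num < 17:
-- 		return "{:02X}".format(num)
-- 	num -= 6
-- 	i = 0 if num < 10 else min(7, (num - 10) // 36 + 1)
-- 	num -= i * 10 + (i - 1) * 26
-- 	if i < 7:
-- 		ones = str(num) if num < 10 else chr(num - 10 + 65)
-- 	else:
-- 		ones = chr(num + 65)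
-- 	return "{}{}".format(i, ones)
-- ===== Notes on version B (the rewrite author's own statement) =====
-- stated objective: simpler
-- what changed: The scanning for-loop over range(10,257,36) that counts sections is replaced by a closed-form division i = min(7,(num-10)//36+1), and the final int(tens/10) float round-trip is replaced by using i directly.
import Mathlib
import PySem

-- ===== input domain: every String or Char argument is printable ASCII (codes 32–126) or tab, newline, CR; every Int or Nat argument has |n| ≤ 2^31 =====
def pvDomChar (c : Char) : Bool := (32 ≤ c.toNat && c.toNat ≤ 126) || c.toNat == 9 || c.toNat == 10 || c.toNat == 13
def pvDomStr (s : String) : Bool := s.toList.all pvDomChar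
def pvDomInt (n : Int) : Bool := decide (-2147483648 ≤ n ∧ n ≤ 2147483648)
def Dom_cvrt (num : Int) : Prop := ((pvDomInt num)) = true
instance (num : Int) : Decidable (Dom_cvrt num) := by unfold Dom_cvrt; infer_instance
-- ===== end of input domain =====

-- B replaces A's section-scanning loop with a closed-form division (objective: simpler).


-- ===== PORT A =====
-- uppercase hex digit for 0 ≤ n < 16 (exact)
def hexDigitU (n : Nat) : Char := if n < 10 then Char.ofNat (48 + n) else Char.ofNat (55 + n)

-- uppercase hex digits of a Nat, most significant first (exact for Python's '{:X}')
def toHexU (n : Nat) : List Char :=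
  if h : n < 16 then [hexDigitU n] else toHexU (n / 16) ++ [hexDigitU (n % 16)]
  decreasing_by exact Nat.div_lt_self (by omega) (by omega)

-- "{:02X}".format(num): sign in front, digits zero-padded so the whole string has width ≥ 2 (exact)
def format02X (num : Int) : String :=
  if num < 0 then String.mk ('-' :: toHexU (-num).toNat)
  else String.mk (PySem.Chars.zfill (toHexU num.toNat) 2)

-- the 'for section in range(10, 257, 36): if num < section: break; i += 1' loop
def cvrtLoop : List Int → Int → Int → Int
  | [], _, i => i
  | s :: rest, num, i => if num < s then i else cvrtLoop rest num (i + 1)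

def cvrt (num : Int) : String :=
  if num < 17 then format02X num
  else
    let num := num - 6
    let i := cvrtLoop (PySem.List.pyRange 10 257 36) num 0
    let tens := i * 10
    let num := num - (tens + (i - 1) * 26)
    let ones :=
      if i < 7 then
        if num < 10 then PySem.Int.toStr num
        else String.mk [Char.ofNat (num - 10 + 65).toNat]
      else String.mk [Char.ofNat (num + 65).toNat]
    PySem.Int.toStr (PySem.Int.floordiv tens 10) ++ ones

-- ===== PORT B =====
def cvrt_alt (num : Int) : String :=
  if num < 17 then format02X num
  else
    let num := num - 6
    let i : Int := if num < 10 then 0 else min 7 (PySem.Int.floordiv (num - 10) 36 + 1)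
    let num := num - (i * 10 + (i - 1) * 26)
    let ones :=
      if i < 7 then
        if num < 10 then PySem.Int.toStr num
        else String.mk [Char.ofNat (num - 10 + 65).toNat]
      else String.mk [Char.ofNat (num + 65).toNat]
    PySem.Int.toStr i ++ ones

-- ===== PRECONDITION & SPEC =====
-- Pre_ excludes num > 1114278, where A's chr() raises ValueError, and the window 55463..57510,
-- where A returns a string containing a lone UTF-16 surrogate code point, which is not a value
-- representable as a Lean String (B returns the identical Python string there).
def Pre_cvrt (num : Int) : Prop := num ≤ 1114278 ∧ ¬(55463 ≤ num ∧ num ≤ 57510)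
instance (num : Int) : Decidable (Pre_cvrt num) := by unfold Pre_cvrt; infer_instance
def pvWitness_cvrt : Int := (30)
def Spec_cvrt (num : Int) (out : String) : Prop := out = cvrt_alt num
instance (num : Int) (out : String) : Decidable (Spec_cvrt num out) := by unfold Spec_cvrt; infer_instance

-- ===== CLAIM (what is proved, stated in full; the proofs are below) =====
def Claim_equal_cvrt : Prop := ∀ (num : Int), Dom_cvrt num → Pre_cvrt num → Spec_cvrt num (cvrt num)

-- ===== LEMMAS AND PROOFS =====

theorem pyRange_sections : PySem.List.pyRange 10 257 36 = [10, 46, 82, 118, 154, 190, 226] := by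
  decide

theorem loop_closed (m : Int) (h : 11 ≤ m) :
    cvrtLoop [10, 46, 82, 118, 154, 190, 226] m 0 =
      min 7 (PySem.Int.floordiv (m - 10) 36 + 1) := by
  have hdiv : ∀ q : Int, q * 36 ≤ m - 10 → m - 10 < (q + 1) * 36 →
      PySem.Int.floordiv (m - 10) 36 = q := by
    intro q h1 h2
    exact (PySem.Int.floordiv_eq_iff_of_pos (by omega)).mpr ⟨h1, h2⟩
  simp only [cvrtLoop]
  split_ifs with h1 h2 h3 h4 h5 h6 h7
  · omega
  · rw [hdiv 0 (by omega) (by omega)]; omega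
  · rw [hdiv 1 (by omega) (by omega)]; omega
  · rw [hdiv 2 (by omega) (by omega)]; omega
  · rw [hdiv 3 (by omega) (by omega)]; omega
  · rw [hdiv 4 (by omega) (by omega)]; omega
  · rw [hdiv 5 (by omega) (by omega)]; omega
  · have hfd : (6 : Int) ≤ PySem.Int.floordiv (m - 10) 36 := by
      rw [PySem.Int.le_floordiv_iff_mul_le (by omega)]
      omega
    have h7' : PySem.Int.floordiv (m - 10) 36 + 1 ≥ 7 := by omega
    omega

theorem mul_ten_floordiv (i : Int) : PySem.Int.floordiv (i * 10) 10 = i := by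
  rw [PySem.Int.floordiv_eq_iff_of_pos (by omega)]
  omega

-- ===== VERDICT (by name: the statement is the Claim_ definition above) =====
theorem cvrt_spec : Claim_equal_cvrt := by
  intro num _ _
  unfold Spec_cvrt cvrt cvrt_alt
  by_cases h : num < 17
  · simp [h]
  · simp only [h, if_false, pyRange_sections]
    rw [loop_closed (num - 6) (by omega)]
    have h10 : ¬ (num - 6 < 10) := by omega
    simp only [h10, if_false, mul_ten_floordiv]
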